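-- pv_equiv track=rewrite | github.com/davide1096/potion | DPO/helper.py | get_mcrst_from_index
-- ===== SOURCE A (Python) =====
-- import math
--
-- def product_prev_sizes(i, intervals):
--     prod = 1
--     for d in range(i):
--         prod *= len(intervals[len(intervals) - 1 - d])
--     return prod
--
-- def get_mcrst_from_index(index, intervals):
--     mcrst = []
--     for i in range(len(intervals)):
--         prod = product_prev_sizes(len(intervals) - 1 - i, intervals)
--         ind = math.floor(index / prod)
--         mcrst.append(ind)
--         index -= prod*ind
--     assert(index == 0)
--     return mcrst
-- ===== SOURCE B (Python) =====
-- import math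
--
-- def get_mcrst_from_index(index, intervals):
--     # One reverse pass precomputes the suffix products of the interval sizes,
--     # then a single pass extracts the mixed-radix digits: O(n) instead of O(n^2).
--     prods = []
--     p = 1
--     for iv in reversed(intervals):
--         prods.append(p)
--         p *= len(iv)
--     mcrst = []
--     for p in reversed(prods):
--         d = math.floor(index / p)
--         mcrst.append(d)
--         index -= p * d
--     assert index == 0
--     return mcrst
-- ===== Notes on version B (the rewrite author's own statement) =====
-- stated objective: faster
-- what changed: B precomputes the suffix products of the interval sizes in one reverse pass and then extracts each mixed-radix digit in O(1), instead of recomputing the product of all later interval sizes from scratch for every position.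
import Mathlib
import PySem

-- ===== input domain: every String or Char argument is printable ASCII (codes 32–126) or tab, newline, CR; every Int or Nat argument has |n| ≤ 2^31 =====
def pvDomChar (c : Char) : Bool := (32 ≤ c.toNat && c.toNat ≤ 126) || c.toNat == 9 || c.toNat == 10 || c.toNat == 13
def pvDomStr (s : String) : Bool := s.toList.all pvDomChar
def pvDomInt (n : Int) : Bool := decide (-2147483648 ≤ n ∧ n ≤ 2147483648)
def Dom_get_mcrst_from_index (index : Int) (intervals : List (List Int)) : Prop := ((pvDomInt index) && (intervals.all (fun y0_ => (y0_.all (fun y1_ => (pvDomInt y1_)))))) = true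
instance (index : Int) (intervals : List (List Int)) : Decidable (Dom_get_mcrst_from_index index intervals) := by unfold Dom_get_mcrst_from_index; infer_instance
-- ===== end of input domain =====

-- B replaces A's per-position recomputation of the product of later interval sizes (O(n^2))
-- by a single reverse pass of suffix products followed by one digit-extraction pass (O(n)).


-- ===== PORT A =====
-- helper product_prev_sizes: 'prod = 1; for d in range(i): prod *= len(intervals[len(intervals)-1-d])'.
-- intervals[len-1-d] is in range at every call site; the out-of-range case (Python IndexError) is
-- never reached and rendered as '.getD []'.
def product_prev_sizes (i : Int) (intervals : List (List Int)) : Int :=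
  (PySem.List.pyRange 0 i 1).foldl
    (fun prod d =>
      prod * (((PySem.List.pyGet? intervals ((intervals.length : Int) - 1 - d)).getD []).length : Int))
    1

-- 'math.floor(index / prod)' on ints is floor division (exact on the admitted inputs); prod = 0
-- (Python ZeroDivisionError) and the failing final assert are excluded by Pre_ below.
def get_mcrst_from_index (index : Int) (intervals : List (List Int)) : List Int :=
  ((PySem.List.pyRange 0 (intervals.length : Int) 1).foldl
    (fun (st : List Int × Int) i =>
      let prod := product_prev_sizes ((intervals.length : Int) - 1 - i) intervals
      let ind := PySem.Int.floordiv st.2 prod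
      (st.1 ++ [ind], st.2 - prod * ind))
    ([], index)).1

-- ===== PORT B =====
-- Source B: one reverse pass accumulates (prods, p); then one pass over reversed(prods) extracts digits.
def get_mcrst_from_index_alt (index : Int) (intervals : List (List Int)) : List Int :=
  let pr := intervals.reverse.foldl
    (fun (st : List Int × Int) iv => (st.1 ++ [st.2], st.2 * (iv.length : Int)))
    ([], 1)
  ((pr.1.reverse).foldl
    (fun (st : List Int × Int) p =>
      let d := PySem.Int.floordiv st.2 p
      (st.1 ++ [d], st.2 - p * d))
    ([], index)).1

-- ===== PRECONDITION & SPEC =====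
-- Pre_ excludes exactly the inputs where the Python A raises: an empty intervals list with a
-- nonzero index (the final 'assert index == 0' fails), and an empty interval after the first
-- position (the product of later sizes is 0, so 'index / prod' raises ZeroDivisionError).
-- B raises on exactly the same inputs.
def Pre_get_mcrst_from_index (index : Int) (intervals : List (List Int)) : Prop :=
  (intervals = [] → index = 0) ∧ ∀ l ∈ intervals.drop 1, l ≠ []
instance (index : Int) (intervals : List (List Int)) : Decidable (Pre_get_mcrst_from_index index intervals) := by unfold Pre_get_mcrst_from_index; infer_instance

def pvWitness_get_mcrst_from_index : Int × List (List Int) := (5, [[1, 2], [3, 4, 5]])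

def Spec_get_mcrst_from_index (index : Int) (intervals : List (List Int)) (out : List Int) : Prop := out = get_mcrst_from_index_alt index intervals
instance (index : Int) (intervals : List (List Int)) (out : List Int) : Decidable (Spec_get_mcrst_from_index index intervals out) := by unfold Spec_get_mcrst_from_index; infer_instance

-- ===== CLAIM (what is proved, stated in full; the proofs are below) =====
def Claim_equal_get_mcrst_from_index : Prop := ∀ (index : Int) (intervals : List (List Int)), Dom_get_mcrst_from_index index intervals → Pre_get_mcrst_from_index index intervals → Spec_get_mcrst_from_index index intervals (get_mcrst_from_index index intervals)

-- ===== LEMMAS AND PROOFS =====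

-- product of all interval sizes of l
def sufProd (l : List (List Int)) : Int := (l.map (fun iv => (iv.length : Int))).prod

-- reference mixed-radix decomposition, structural on the list of intervals
def goDigits (idx : Int) : List (List Int) → List Int
  | [] => []
  | _ :: rest =>
      let p := sufProd rest
      let d := PySem.Int.floordiv idx p
      d :: goDigits (idx - p * d) rest

-- the suffix products in increasing-length order of the tail: [sufProd rest₁, sufProd rest₂, …]
def sufList : List (List Int) → List Int
  | [] => []
  | _ :: rest => sufProd rest :: sufList rest


@[simp] lemma sufProd_nil : sufProd [] = 1 := rfl
@[simp] lemma sufProd_cons (iv : List Int) (rest : List (List Int)) :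
    sufProd (iv :: rest) = (iv.length : Int) * sufProd rest := by simp [sufProd]

lemma ppz_eq_sufProd (l : List (List Int)) :
    ∀ k : Nat, k ≤ l.length →
      product_prev_sizes (k : Int) l = sufProd (l.drop (l.length - k)) := by
  intro k
  induction k with
  | zero =>
    intro _
    simp [product_prev_sizes, PySem.List.pyRange_one_eq_nil (le_refl (0:Int))]
  | succ k ih =>
    intro h
    have hcast : ((k + 1 : Nat) : Int) = (k : Int) + 1 := by push_cast; ring
    have hk0 : (0 : Int) ≤ (k : Int) := Int.natCast_nonneg k
    unfold product_prev_sizes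
    rw [hcast, PySem.List.pyRange_one_succ_right hk0, List.foldl_append]
    have hpref : (PySem.List.pyRange 0 (k : Int) 1).foldl
        (fun prod d =>
          prod * (((PySem.List.pyGet? l ((l.length : Int) - 1 - d)).getD []).length : Int))
        1 = product_prev_sizes (k : Int) l := rfl
    have hidx : ((l.length : Int) - 1 - (k : Int)) = ((l.length - 1 - k : Nat) : Int) := by omega
    have hlt : l.length - 1 - k < l.length := by omega
    have hdrop1 : l.length - (k + 1) = l.length - 1 - k := by omega
    have hdrop2 : l.length - 1 - k + 1 = l.length - k := by omega
    rw [List.foldl_cons, List.foldl_nil, hpref, ih (by omega), hidx,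
      PySem.List.pyGet?_natCast, List.getElem?_eq_getElem hlt, hdrop1,
      List.drop_eq_getElem_cons hlt, sufProd_cons, hdrop2]
    simp [Option.getD]
    ring

lemma ppz_cons (iv : List Int) (rest : List (List Int)) (j : Int)
    (h0 : 0 ≤ j) (h1 : j ≤ (rest.length : Int)) :
    product_prev_sizes j (iv :: rest) = product_prev_sizes j rest := by
  obtain ⟨k, rfl⟩ : ∃ k : Nat, j = (k : Int) := ⟨j.toNat, (Int.toNat_of_nonneg h0).symm⟩
  have hk : k ≤ rest.length := by exact_mod_cast h1
  rw [ppz_eq_sufProd _ k (by simp; omega), ppz_eq_sufProd _ k hk]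
  congr 1
  have hlen : (iv :: rest).length - k = (rest.length - k) + 1 := by simp; omega
  rw [hlen, List.drop_succ_cons]

lemma A_loop (l : List (List Int)) : ∀ (idx : Int) (acc : List Int),
    ((List.range l.length).foldl
      (fun (st : List Int × Int) (k : Nat) =>
        (st.1 ++ [PySem.Int.floordiv st.2 (product_prev_sizes ((l.length : Int) - 1 - (k : Int)) l)],
         st.2 - product_prev_sizes ((l.length : Int) - 1 - (k : Int)) l *
           PySem.Int.floordiv st.2 (product_prev_sizes ((l.length : Int) - 1 - (k : Int)) l)))
      (acc, idx)).1 = acc ++ goDigits idx l := by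
  induction l with
  | nil => intro idx acc; simp [goDigits]
  | cons iv rest ih =>
    intro idx acc
    rw [List.length_cons, List.range_succ_eq_map, List.foldl_cons, List.foldl_map]
    have h0 : product_prev_sizes (((rest.length + 1 : Nat) : Int) - 1 - ((0 : Nat) : Int))
        (iv :: rest) = sufProd rest := by
      have : (((rest.length + 1 : Nat) : Int) - 1 - ((0 : Nat) : Int))
          = ((rest.length : Nat) : Int) := by omega
      rw [this, ppz_cons iv rest _ (Int.natCast_nonneg _) (le_refl _),
        ppz_eq_sufProd _ rest.length (le_refl _)]
      simp
    have hcong : (List.range rest.length).foldl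
        (fun (st : List Int × Int) (k : Nat) =>
          (st.1 ++ [PySem.Int.floordiv st.2 (product_prev_sizes (((iv :: rest).length : Int) - 1 - ((k.succ : Nat) : Int)) (iv :: rest))],
           st.2 - product_prev_sizes (((iv :: rest).length : Int) - 1 - ((k.succ : Nat) : Int)) (iv :: rest) *
             PySem.Int.floordiv st.2 (product_prev_sizes (((iv :: rest).length : Int) - 1 - ((k.succ : Nat) : Int)) (iv :: rest))))
        (acc ++ [PySem.Int.floordiv idx (sufProd rest)],
         idx - sufProd rest * PySem.Int.floordiv idx (sufProd rest))
        = (List.range rest.length).foldl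
        (fun (st : List Int × Int) (k : Nat) =>
          (st.1 ++ [PySem.Int.floordiv st.2 (product_prev_sizes ((rest.length : Int) - 1 - (k : Int)) rest)],
           st.2 - product_prev_sizes ((rest.length : Int) - 1 - (k : Int)) rest *
             PySem.Int.floordiv st.2 (product_prev_sizes ((rest.length : Int) - 1 - (k : Int)) rest)))
        (acc ++ [PySem.Int.floordiv idx (sufProd rest)],
         idx - sufProd rest * PySem.Int.floordiv idx (sufProd rest)) := by
      apply PySem.List.foldl_congr_mem
      intro st k hk
      have hk' : k < rest.length := List.mem_range.mp hk
      have harg : (((iv :: rest).length : Int) - 1 - ((k.succ : Nat) : Int))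
          = ((rest.length : Int) - 1 - (k : Int)) := by simp; omega
      have hppz : product_prev_sizes ((rest.length : Int) - 1 - (k : Int)) (iv :: rest)
          = product_prev_sizes ((rest.length : Int) - 1 - (k : Int)) rest :=
        ppz_cons iv rest _ (by omega) (by omega)
      simp only [harg, hppz]
    simp only [List.length_cons] at hcong ⊢
    rw [h0] at *
    rw [hcong, ih]
    simp [goDigits]

lemma A_eq_go (l : List (List Int)) (idx : Int) :
    get_mcrst_from_index idx l = goDigits idx l := by
  have h := A_loop l idx []
  unfold get_mcrst_from_index
  rw [PySem.List.pyRange_zero_natCast, List.foldl_map]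
  simpa using h

lemma B_prods (l : List (List Int)) :
    l.reverse.foldl (fun (st : List Int × Int) iv => (st.1 ++ [st.2], st.2 * (iv.length : Int)))
      ([], 1) = ((sufList l).reverse, sufProd l) := by
  induction l with
  | nil => simp [sufList]
  | cons iv rest ih =>
    rw [List.reverse_cons, List.foldl_append, ih]
    simp [sufList]
    ring

lemma B_loop : ∀ (l : List (List Int)) (idx : Int) (acc : List Int),
    ((sufList l).foldl (fun (st : List Int × Int) p =>
        let d := PySem.Int.floordiv st.2 p
        (st.1 ++ [d], st.2 - p * d)) (acc, idx)).1 = acc ++ goDigits idx l := by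
  intro l
  induction l with
  | nil => intro idx acc; simp [sufList, goDigits]
  | cons iv rest ih =>
    intro idx acc
    simp only [sufList, List.foldl_cons, goDigits]
    rw [ih]
    simp

lemma B_eq_go (l : List (List Int)) (idx : Int) :
    get_mcrst_from_index_alt idx l = goDigits idx l := by
  unfold get_mcrst_from_index_alt
  rw [B_prods]
  simpa [List.reverse_reverse] using B_loop l idx []

-- ===== VERDICT (by name: the statement is the Claim_ definition above) =====
theorem get_mcrst_from_index_spec : Claim_equal_get_mcrst_from_index := by
  intro index intervals _ _
  unfold Spec_get_mcrst_from_index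
  rw [A_eq_go, B_eq_go]
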